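-- pv_equiv track=rewrite | github.com/requiemformemories/google-foobar | lovely-lucky-lambs.py | be_stingy
-- ===== SOURCE A (Python) =====
-- def be_stingy(total_lambs):
--     number_of_henchmen = 0
--     paid = [1]
--     while True:
--         if total_lambs < paid[len(paid) - 1]:
--             return number_of_henchmen
--         total_lambs -= paid[len(paid) - 1]
--         if len(paid) == 1:
--             paid.append(1)
--         else:
--             paid.append(paid[len(paid) - 1] + paid[len(paid) - 2])
--         number_of_henchmen += 1
-- ===== SOURCE B (Python) =====
-- def be_stingy(total_lambs):
--     # Identity: the Fibonacci payouts 1, 1, 2, 3, ... satisfy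
--     # F(1) + ... + F(m) = F(m+2) - 1, so henchman m is affordable exactly
--     # when F(m+2) <= total_lambs + 1.  Hence the answer is the number of
--     # Fibonacci numbers F(3), F(4), ... that are <= total_lambs + 1:
--     # no subtraction from the budget, no running sum, no list.
--     def fits(a, b):
--         if b > total_lambs + 1:
--             return 0
--         return 1 + fits(b, a + b)
--     return fits(1, 2)
-- ===== Notes on version B (the rewrite author's own statement) =====
-- stated objective: alternative
-- what changed: B never subtracts payouts from the budget and keeps no list or running sum: using the identity F(1)+...+F(m)=F(m+2)-1 it recursively counts the Fibonacci numbers F(3),F(4),... that are <= total_lambs+1, that count being the answer.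
import Mathlib
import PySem

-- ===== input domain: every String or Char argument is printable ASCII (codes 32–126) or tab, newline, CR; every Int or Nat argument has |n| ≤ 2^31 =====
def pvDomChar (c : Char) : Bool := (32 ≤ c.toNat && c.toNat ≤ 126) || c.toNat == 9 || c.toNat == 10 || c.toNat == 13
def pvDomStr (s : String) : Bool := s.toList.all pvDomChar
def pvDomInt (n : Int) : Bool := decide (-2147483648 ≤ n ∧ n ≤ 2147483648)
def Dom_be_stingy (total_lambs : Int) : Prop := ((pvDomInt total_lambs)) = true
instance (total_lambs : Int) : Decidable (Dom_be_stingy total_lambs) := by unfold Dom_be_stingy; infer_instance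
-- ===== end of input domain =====

-- B drops A's list/subtraction entirely: by the identity F(1)+...+F(m)=F(m+2)-1 it
-- recursively counts the Fibonacci numbers F(3),F(4),... that are <= total_lambs+1.


-- ===== PORT A =====
-- A's while-True loop; paid[len(paid)-1] is the last element of the (always nonempty)
-- list, paid[len(paid)-2] the second-to-last, ported as getLastD/dropLast.
def beLoop (total_lambs : Int) (paid : List Int) (number_of_henchmen : Int) : Int :=
  if total_lambs < paid.getLastD 0 then number_of_henchmen
  else if paid.getLastD 0 ≤ 0 then number_of_henchmen
    -- ^ totality guard only, never taken: every entry of paid is ≥ 1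
  else
    beLoop (total_lambs - paid.getLastD 0)
      (paid ++ [if paid.length = 1 then 1 else paid.getLastD 0 + paid.dropLast.getLastD 0])
      (number_of_henchmen + 1)
termination_by total_lambs.toNat
decreasing_by omega

def be_stingy (total_lambs : Int) : Int := beLoop total_lambs [1] 0

-- ===== PORT B =====
-- Source B's inner recursive 'fits(a, b)' closing over total_lambs.
def fitsRec (total_lambs a b : Int) : Int :=
  if a ≤ 0 then 0
    -- ^ totality guard only, never taken: a is always a positive Fibonacci number
  else if total_lambs + 1 < b then 0
  else 1 + fitsRec total_lambs b (a + b)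
termination_by (total_lambs + 2 - b).toNat
decreasing_by omega

def be_stingy_alt (total_lambs : Int) : Int := fitsRec total_lambs 1 2

-- ===== PRECONDITION & SPEC =====
def Spec_be_stingy (total_lambs : Int) (out : Int) : Prop := out = be_stingy_alt total_lambs
instance (total_lambs : Int) (out : Int) : Decidable (Spec_be_stingy total_lambs out) := by unfold Spec_be_stingy; infer_instance

-- ===== CLAIM (what is proved, stated in full; the proofs are below) =====
def Claim_equal_be_stingy : Prop := ∀ (total_lambs : Int), Dom_be_stingy total_lambs → Spec_be_stingy total_lambs (be_stingy total_lambs)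

-- ===== LEMMAS AND PROOFS =====

-- After the first payment the two recursions run in lockstep: if A's remaining budget
-- is t and its last two payouts are (p, c), then B sits at the Fibonacci pair
-- (a, b) = (p + c, p + 2*c) with original total T = t + a - 1, and
-- beLoop t paid n = n + fitsRec T a b.
lemma loop_agree (m : Nat) : ∀ (t n p c T : Int) (paid : List Int),
    t.toNat ≤ m → 1 ≤ c → 1 ≤ p →
    paid.getLastD 0 = c → paid.dropLast.getLastD 0 = p → 2 ≤ paid.length →
    T = t + (p + c) - 1 →
    beLoop t paid n = n + fitsRec T (p + c) (p + c + c) := by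
  induction m with
  | zero =>
    intro t n p c T paid hm hc hp hlast hprev hlen hT
    rw [beLoop, fitsRec]
    simp only [hlast, hprev]
    have ht : t < c := by omega
    rw [if_pos ht, if_neg (by omega : ¬ p + c ≤ 0), if_pos (by omega : T + 1 < p + c + c)]
    ring
  | succ m ih =>
    intro t n p c T paid hm hc hp hlast hprev hlen hT
    rw [beLoop, fitsRec]
    simp only [hlast, hprev]
    by_cases ht : t < c
    · rw [if_pos ht, if_neg (by omega : ¬ p + c ≤ 0), if_pos (by omega : T + 1 < p + c + c)]
      ring
    · have hne : paid.length ≠ 1 := by omega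
      rw [if_neg ht, if_neg (by omega : ¬ c ≤ 0), if_neg (by omega : ¬ p + c ≤ 0),
        if_neg (by omega : ¬ T + 1 < p + c + c), if_neg hne]
      have := ih (t - c) (n + 1) c (c + p) T (paid ++ [c + p])
        (by omega) (by omega) (by omega)
        (by simp) (by rw [List.dropLast_concat]; exact hlast) (by simp; omega)
        (by omega)
      rw [this, show c + (c + p) = p + c + c from by ring,
        show p + c + c + (c + p) = p + c + (p + c + c) from by ring]
      ring

-- ===== VERDICT (by name: the statement is the Claim_ definition above) =====
theorem be_stingy_spec : Claim_equal_be_stingy := by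
  intro t _
  unfold Spec_be_stingy be_stingy be_stingy_alt
  rw [beLoop, fitsRec]
  rw [show ([1]:List Int).getLastD 0 = 1 from rfl,
    show ([1]:List Int).length = 1 from rfl]
  by_cases h1 : t < 1
  · rw [if_pos h1, if_neg (by omega : ¬ (1:Int) ≤ 0), if_pos (by omega : t + 1 < 2)]
  · rw [if_neg h1, if_neg (by omega : ¬ (1:Int) ≤ 0), if_neg (by omega : ¬ (1:Int) ≤ 0),
      if_neg (by omega : ¬ t + 1 < 2), if_pos rfl]
    have := loop_agree t.toNat (t - 1) 1 1 1 t ([1] ++ [1])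
      (by omega) (by omega) (by omega) (by simp) (by simp) (by simp) (by omega)
    norm_num at this ⊢
    exact this
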